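-- pv_equiv track=rewrite | github.com/Attiq-Shah/Template-Recognition-Using-Evolutionary-Algorithm | Proj_1.py | Binary_10_Bits
-- ===== SOURCE A (Python) =====
-- def Binary_10_Bits(Number):
--     Bin_List = []
--     i = 1 << 9
--     while i > 0:
--         if Number & i != 0:
--             Bin_List.append(1)
--         else:
--             Bin_List.append(0)
--         i = i // 2
--     return Bin_List
-- ===== SOURCE B (Python) =====
-- def Binary_10_Bits(Number):
--     # Mask to the low 10 bits and let string formatting extract the bits MSB-first.
--     return [int(c) for c in format(Number & 0x3FF, '010b')]
-- ===== Notes on version B (the rewrite author's own statement) =====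
-- stated objective: idiomatic
-- what changed: Replaces the explicit mask-halving while-loop with a single mask (Number & 0x3FF) followed by fixed-width binary string formatting and a comprehension over its characters.
import Mathlib
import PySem

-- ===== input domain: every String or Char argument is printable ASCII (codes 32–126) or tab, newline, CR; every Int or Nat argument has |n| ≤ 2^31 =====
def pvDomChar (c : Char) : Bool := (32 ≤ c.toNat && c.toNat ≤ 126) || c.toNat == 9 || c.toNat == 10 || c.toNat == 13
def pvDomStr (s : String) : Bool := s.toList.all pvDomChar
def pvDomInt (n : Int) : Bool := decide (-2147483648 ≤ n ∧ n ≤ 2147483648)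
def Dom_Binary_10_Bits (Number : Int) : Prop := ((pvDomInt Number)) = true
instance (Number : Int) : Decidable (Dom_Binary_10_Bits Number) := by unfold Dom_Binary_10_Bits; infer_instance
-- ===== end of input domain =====

-- B replaces A's mask-halving while-loop by one mask (& 0x3FF) plus fixed-width binary
-- formatting read off digit by digit (idiomatic; same constant cost).

-- ===== PORT A =====
-- while i > 0: append (1 if Number & i != 0 else 0); i = i // 2
def pvALoop (Number i : Int) : List Int :=
  if _h : i > 0 then
    (if PySem.Int.band Number i ≠ 0 then (1 : Int) else 0) :: pvALoop Number (PySem.Int.floordiv i 2)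
  else []
termination_by i.toNat
decreasing_by simp only [PySem.Int.floordiv]; rw [Int.fdiv_eq_ediv]; norm_num; omega

def Binary_10_Bits (Number : Int) : List Int :=
  pvALoop Number (1 <<< 9)

-- ===== PORT B =====
-- format(Number & 0x3FF, '010b') read as its 10 binary digits MSB-first; int(c) is the digit value.
def pvBits10 (m : Nat) : List Int :=
  (List.range 10).map (fun k => (((m >>> (9 - k)) % 2 : Nat) : Int))

def Binary_10_Bits_alt (Number : Int) : List Int :=
  pvBits10 (PySem.Int.band Number 1023).toNat

-- ===== PRECONDITION & SPEC =====
def Spec_Binary_10_Bits (Number : Int) (out : List Int) : Prop := out = Binary_10_Bits_alt Number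
instance (Number : Int) (out : List Int) : Decidable (Spec_Binary_10_Bits Number out) := by unfold Spec_Binary_10_Bits; infer_instance

-- ===== CLAIM (what is proved, stated in full; the proofs are below) =====
def Claim_equal_Binary_10_Bits : Prop := ∀ (Number : Int), Dom_Binary_10_Bits Number → Spec_Binary_10_Bits Number (Binary_10_Bits Number)

-- ===== LEMMAS AND PROOFS =====

theorem and1023 (n : Nat) : n &&& 1023 = n % 1024 := by
  apply Nat.eq_of_testBit_eq; intro i
  rw [Nat.testBit_and, show (1024:Nat) = 2^10 from rfl, Nat.testBit_mod_two_pow,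
      show (1023:Nat) = 2^10 - 1 from rfl, Nat.testBit_two_pow_sub_one, Bool.and_comm]

theorem and2pow (n j : Nat) (h : j < 10) : n &&& 2^j = (n % 1024) &&& 2^j := by
  rw [Nat.and_two_pow, Nat.and_two_pow, show (1024:Nat) = 2^10 from rfl, Nat.testBit_mod_two_pow]
  simp [h]

theorem stepA (N i : Int) (h : i > 0) :
    pvALoop N i = (if PySem.Int.band N i ≠ 0 then (1 : Int) else 0) :: pvALoop N (PySem.Int.floordiv i 2) := by
  rw [pvALoop.eq_def, dif_pos h]

theorem stopA (N : Int) : pvALoop N 0 = [] := by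
  rw [pvALoop.eq_def, dif_neg (by norm_num)]

-- A unrolled to its ten iterations
theorem unrollA (N : Int) : Binary_10_Bits N =
    [if PySem.Int.band N 512 ≠ 0 then 1 else 0, if PySem.Int.band N 256 ≠ 0 then 1 else 0,
     if PySem.Int.band N 128 ≠ 0 then 1 else 0, if PySem.Int.band N 64 ≠ 0 then 1 else 0,
     if PySem.Int.band N 32 ≠ 0 then 1 else 0, if PySem.Int.band N 16 ≠ 0 then 1 else 0,
     if PySem.Int.band N 8 ≠ 0 then 1 else 0, if PySem.Int.band N 4 ≠ 0 then 1 else 0,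
     if PySem.Int.band N 2 ≠ 0 then 1 else 0, if PySem.Int.band N 1 ≠ 0 then 1 else 0] := by
  unfold Binary_10_Bits
  rw [show (1 <<< 9 : Int) = 512 from by decide]
  rw [stepA _ _ (by norm_num), show PySem.Int.floordiv 512 2 = (256:Int) from by decide,
      stepA _ _ (by norm_num), show PySem.Int.floordiv 256 2 = (128:Int) from by decide,
      stepA _ _ (by norm_num), show PySem.Int.floordiv 128 2 = (64:Int) from by decide,
      stepA _ _ (by norm_num), show PySem.Int.floordiv 64 2 = (32:Int) from by decide,
      stepA _ _ (by norm_num), show PySem.Int.floordiv 32 2 = (16:Int) from by decide,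
      stepA _ _ (by norm_num), show PySem.Int.floordiv 16 2 = (8:Int) from by decide,
      stepA _ _ (by norm_num), show PySem.Int.floordiv 8 2 = (4:Int) from by decide,
      stepA _ _ (by norm_num), show PySem.Int.floordiv 4 2 = (2:Int) from by decide,
      stepA _ _ (by norm_num), show PySem.Int.floordiv 2 2 = (1:Int) from by decide,
      stepA _ _ (by norm_num), show PySem.Int.floordiv 1 2 = (0:Int) from by decide,
      stopA]

-- B unrolled to its ten digits
theorem unrollB (N : Int) : Binary_10_Bits_alt N =
    [((((PySem.Int.band N 1023).toNat >>> 9) % 2 : Nat) : Int), ((((PySem.Int.band N 1023).toNat >>> 8) % 2 : Nat) : Int),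
     ((((PySem.Int.band N 1023).toNat >>> 7) % 2 : Nat) : Int), ((((PySem.Int.band N 1023).toNat >>> 6) % 2 : Nat) : Int),
     ((((PySem.Int.band N 1023).toNat >>> 5) % 2 : Nat) : Int), ((((PySem.Int.band N 1023).toNat >>> 4) % 2 : Nat) : Int),
     ((((PySem.Int.band N 1023).toNat >>> 3) % 2 : Nat) : Int), ((((PySem.Int.band N 1023).toNat >>> 2) % 2 : Nat) : Int),
     ((((PySem.Int.band N 1023).toNat >>> 1) % 2 : Nat) : Int), ((((PySem.Int.band N 1023).toNat >>> 0) % 2 : Nat) : Int)] := by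
  unfold Binary_10_Bits_alt pvBits10
  rfl

set_option maxRecDepth 8000 in
theorem coreG : ∀ m : Nat, m < 1024 → ∀ j : Nat, j < 10 →
    (if ((m &&& 2^j : Nat) : Int) ≠ 0 then (1 : Int) else 0) = (((m >>> j) % 2 : Nat) : Int) := by
  decide

set_option maxRecDepth 8000 in
theorem coreGneg : ∀ m : Nat, m < 1024 → ∀ j : Nat, j < 10 →
    (if ((2^j - (2^j &&& m) : Nat) : Int) ≠ 0 then (1 : Int) else 0) = ((((1023 - m) >>> j) % 2 : Nat) : Int) := by
  decide

theorem bitG (N c : Int) (j : Nat) (hj : j < 10) (hc : c = ((2^j : Nat) : Int)) :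
    (if PySem.Int.band N c ≠ 0 then (1 : Int) else 0)
      = ((((PySem.Int.band N 1023).toNat >>> j) % 2 : Nat) : Int) := by
  subst hc
  by_cases h : 0 ≤ N
  · rw [PySem.Int.band_of_nonneg h (by positivity), PySem.Int.band_of_nonneg h (by norm_num),
        Int.toNat_natCast, show (1023:Int).toNat = 1023 from rfl, and1023, Int.toNat_natCast,
        and2pow N.toNat j hj]
    exact coreG (N.toNat % 1024) (Nat.mod_lt _ (by norm_num)) j hj
  · have h' : ¬ (0 ≤ N) := h
    simp only [PySem.Int.band, if_neg h',
      if_pos (show (0:Int) ≤ ((2^j : Nat) : Int) by positivity),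
      if_pos (show (0:Int) ≤ (1023:Int) by norm_num)]
    rw [Int.toNat_natCast, show (1023:Int).toNat = 1023 from rfl]
    rw [show (2^j : Nat) &&& (-N - 1).toNat = (2^j : Nat) &&& ((-N - 1).toNat % 1024) by
          rw [Nat.and_comm, Nat.and_comm (2^j), ← and2pow _ j hj],
        show (1023 : Nat) &&& (-N - 1).toNat = (-N - 1).toNat % 1024 by
          rw [Nat.and_comm, and1023],
        Int.toNat_natCast]
    exact coreGneg ((-N - 1).toNat % 1024) (Nat.mod_lt _ (by norm_num)) j hj

-- ===== VERDICT (by name: the statement is the Claim_ definition above) =====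
theorem Binary_10_Bits_spec : Claim_equal_Binary_10_Bits := by
  intro N _
  unfold Spec_Binary_10_Bits
  rw [unrollA, unrollB]
  rw [bitG N 512 9 (by norm_num) (by norm_num), bitG N 256 8 (by norm_num) (by norm_num),
      bitG N 128 7 (by norm_num) (by norm_num), bitG N 64 6 (by norm_num) (by norm_num),
      bitG N 32 5 (by norm_num) (by norm_num), bitG N 16 4 (by norm_num) (by norm_num),
      bitG N 8 3 (by norm_num) (by norm_num), bitG N 4 2 (by norm_num) (by norm_num),
      bitG N 2 1 (by norm_num) (by norm_num), bitG N 1 0 (by norm_num) (by norm_num)]
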